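-- pv_equiv track=rewrite | github.com/linhdvu14/cp-sols | sols/CodeForces/1833_d3/D_Flipper.py | solve
-- ===== SOURCE A (Python) =====
-- def solve(N, A):
--     if N == 1: return A
--
--     j = 1
--     for i in range(2, N):
--         if A[i] > A[j]:
--             j = i
--
--     res = max(A[::-1], [A[-1]] + A[:-1])
--     tail = A[j:]
--     for i in range(j):
--         head = A[:i]
--         mid = A[i:j]
--         cand = tail + mid[::-1] + head
--         res = max(res, cand)
--
--     return res
-- ===== SOURCE B (Python) =====
-- def solve(N, A):
--     if N == 1 or len(A) <= 1:
--         return list(A)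
--     # pivot: first position of the maximum among the entries the scan visits (A[1:N]);
--     # for N <= 2 the scan never runs, so the pivot stays 1
--     if N <= 2:
--         j = 1
--     else:
--         w = A[1:N]
--         j = 1 + w.index(max(w))
--     # candidate pool: full reverse, right rotation, and the flip candidates at the pivot
--     cands = [A[::-1], [A[-1]] + A[:-1]]
--     for i in range(j):
--         cands.append(A[j:] + A[i:j][::-1] + A[:i])
--     # column-wise elimination: build the answer one position at a time, keeping
--     # only the candidates that still match the maximal element at each position
--     out = []
--     for p in range(len(A)):
--         best = max(c[p] for c in cands)
--         out.append(best)
--         cands = [c for c in cands if c[p] == best]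
--     return out
-- ===== Notes on version B (the rewrite author's own statement) =====
-- stated objective: alternative
-- what changed: B replaces A's row-wise fold of pairwise lexicographic max over one candidate at a time by a column-wise elimination tournament: it builds the candidate pool once, then constructs the output position by position, at each position appending the maximal element and keeping only the candidates that match it, so the answer is assembled incrementally from a shrinking survivor set instead of repeated whole-list comparisons.
import Mathlib
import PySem

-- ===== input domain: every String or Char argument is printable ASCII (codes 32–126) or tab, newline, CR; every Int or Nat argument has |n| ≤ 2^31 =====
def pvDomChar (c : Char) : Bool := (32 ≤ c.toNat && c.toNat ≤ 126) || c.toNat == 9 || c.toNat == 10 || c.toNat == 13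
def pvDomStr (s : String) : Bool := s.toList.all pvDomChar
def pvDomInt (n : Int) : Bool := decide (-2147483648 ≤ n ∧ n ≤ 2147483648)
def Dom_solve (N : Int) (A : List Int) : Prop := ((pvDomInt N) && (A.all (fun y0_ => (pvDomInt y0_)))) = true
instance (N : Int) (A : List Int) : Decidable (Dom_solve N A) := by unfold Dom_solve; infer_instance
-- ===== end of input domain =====

-- B selects the answer by a column-wise elimination tournament over the candidate pool (building
-- the output position by position from a shrinking survivor set) instead of A's row-wise fold of
-- pairwise lexicographic max (objective: alternative; return-value equivalence on Pre_).

-- ===== PORT A =====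
-- Python's two-argument max on lists (lexicographic, first argument on ties);
-- Mathlib's `<` on List Int is exactly Python's list comparison.
def pymax (a b : List Int) : List Int := if a < b then b else a

def solve (N : Int) (A : List Int) : List Int :=
  if N == 1 then A else
  let j : Int := (PySem.List.pyRange 2 N 1).foldl (fun j i =>
      if PySem.List.pyGetD A i 0 > PySem.List.pyGetD A j 0 then i else j) 1
  let res0 := pymax ((PySem.List.slice? A none none (-1)).getD [])
      ([PySem.List.pyGetD A (-1) 0] ++ PySem.List.slice A none (some (-1)))
  let tail := PySem.List.slice A (some j) none
  (PySem.List.pyRange 0 j 1).foldl (fun res i =>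
      let head := PySem.List.slice A none (some i)
      let mid := PySem.List.slice A (some i) (some j)
      let cand := tail ++ ((PySem.List.slice? mid none none (-1)).getD []) ++ head
      pymax res cand) res0

-- ===== PORT B =====
-- one step of B's column-wise elimination: append the maximal element at position p to the
-- output and keep only the candidates matching it (max over a generator = PySem.List.max?)
def colStep (st : List Int × List (List Int)) (p : Int) : List Int × List (List Int) :=
  let best := (PySem.List.max? (st.2.map (fun c => PySem.List.pyGetD c p 0)) (fun x => x)).getD 0
  (st.1 ++ [best], st.2.filter (fun c => PySem.List.pyGetD c p 0 == best))

def solve_alt (N : Int) (A : List Int) : List Int :=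
  if N == 1 || A.length ≤ 1 then A else
  let j : Int :=
    if N ≤ 2 then 1 else
      let w := PySem.List.slice A (some 1) (some N)
      1 + (((PySem.List.index? w ((PySem.List.max? w (fun x => x)).getD 0)).getD 0 : Nat) : Int)
  let cands : List (List Int) :=
    [((PySem.List.slice? A none none (-1)).getD []),
     [PySem.List.pyGetD A (-1) 0] ++ PySem.List.slice A none (some (-1))] ++
    (PySem.List.pyRange 0 j 1).map (fun i =>
      PySem.List.slice A (some j) none ++
      ((PySem.List.slice? (PySem.List.slice A (some i) (some j)) none none (-1)).getD []) ++
      PySem.List.slice A none (some i))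
  ((PySem.List.pyRange 0 (A.length : Int) 1).foldl colStep ([], cands)).1

-- ===== PRECONDITION & SPEC =====
-- Pre_ is exactly the set of inputs on which the Python A returns normally: A raises IndexError
-- precisely when A is empty with N ≠ 1 (it reads A[-1]), or when 3 ≤ N exceeds len(A) so the
-- argmax scan indexes past the end.
def Pre_solve (N : Int) (A : List Int) : Prop := N = 1 ∨ (A ≠ [] ∧ (N ≤ 2 ∨ N ≤ (A.length : Int)))
instance (N : Int) (A : List Int) : Decidable (Pre_solve N A) := by unfold Pre_solve; infer_instance

def pvWitness_solve : Int × List Int := (3, [2, 5, 1])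

def Spec_solve (N : Int) (A : List Int) (out : List Int) : Prop := out = solve_alt N A
instance (N : Int) (A : List Int) (out : List Int) : Decidable (Spec_solve N A out) := by unfold Spec_solve; infer_instance

-- ===== CLAIM (what is proved, stated in full; the proofs are below) =====
def Claim_equal_solve : Prop := ∀ (N : Int) (A : List Int), Dom_solve N A → Pre_solve N A → Spec_solve N A (solve N A)

-- ===== LEMMAS AND PROOFS =====

theorem pymax_eq_max (a b : List Int) : pymax a b = max a b := by
  unfold pymax
  rcases lt_trichotomy a b with h | h | h
  · rw [if_pos h, max_eq_right h.le]
  · subst h; simp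
  · rw [if_neg (not_lt_of_gt h), max_eq_left h.le]

-- a fold of pymax is a member of the folded list and an upper bound of it
theorem foldl_pymax_spec (cs : List (List Int)) (c0 : List Int) :
    cs.foldl pymax c0 ∈ c0 :: cs ∧ ∀ c ∈ c0 :: cs, c ≤ cs.foldl pymax c0 := by
  induction cs generalizing c0 with
  | nil => exact ⟨List.mem_singleton.mpr rfl, by intro c hc; simp at hc; simp [hc]⟩
  | cons d cs ih =>
      obtain ⟨hmem, hub⟩ := ih (pymax c0 d)
      simp only [List.foldl_cons]
      constructor
      · rcases List.mem_cons.mp hmem with h | h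
        · rw [h, pymax_eq_max]
          rcases max_choice c0 d with hc | hc <;> rw [hc] <;> simp
        · exact List.mem_cons_of_mem _ (List.mem_cons_of_mem _ h)
      · intro c hc
        rcases List.mem_cons.mp hc with h | h
        · subst h
          exact le_trans (by rw [pymax_eq_max]; exact le_max_left _ _)
            (hub _ (List.mem_cons_self))
        · rcases List.mem_cons.mp h with h' | h'
          · subst h'
            exact le_trans (by rw [pymax_eq_max]; exact le_max_right _ _)
              (hub _ (List.mem_cons_self))
          · exact hub _ (List.mem_cons_of_mem _ h')

-- lexicographic order decided at the first differing position
theorem lex_lt_of_take_eq (s : Nat) : ∀ (c M : List Int), c.take s = M.take s →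
    s < c.length → s < M.length → M.getD s 0 < c.getD s 0 → M < c := by
  induction s with
  | zero =>
      intro c M _ hc hm hlt
      rcases c with _ | ⟨a, c'⟩
      · simp at hc
      · rcases M with _ | ⟨b, M'⟩
        · simp at hm
        · simp only [List.getD_cons_zero] at hlt
          exact (List.cons_lt_cons_iff).mpr (Or.inl hlt)
  | succ s ih =>
      intro c M htake hc hm hlt
      rcases c with _ | ⟨a, c'⟩
      · simp at hc
      · rcases M with _ | ⟨b, M'⟩
        · simp at hm
        · simp only [List.take_succ_cons, List.cons.injEq] at htake
          obtain ⟨rfl, htake'⟩ := htake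
          simp only [List.getD_cons_succ] at hlt
          exact (List.cons_lt_cons_iff).mpr
            (Or.inr ⟨rfl, ih c' M' htake' (by simpa using hc) (by simpa using hm) hlt⟩)

theorem getD_le_of_le (s : Nat) (c M : List Int) (htake : c.take s = M.take s)
    (hc : s < c.length) (hm : s < M.length) (hle : c ≤ M) : c.getD s 0 ≤ M.getD s 0 := by
  by_contra h
  exact absurd (lex_lt_of_take_eq s c M htake hc hm (lt_of_not_ge h)) (not_lt_of_ge hle)

-- column-wise elimination over positions s, s+1, …, s+n-1 returns the lexicographic maximum M
-- of the surviving pool (all of length s+n, all agreeing with M on the first s positions)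
theorem prune_eq (n : Nat) : ∀ (s : Nat) (cs : List (List Int)) (out0 M : List Int),
    (∀ c ∈ cs, c.length = s + n) → (∀ c ∈ cs, c.take s = M.take s) →
    M ∈ cs → (∀ c ∈ cs, c ≤ M) →
    (((List.range' s n).map (fun (p : Nat) => (p : Int))).foldl colStep (out0, cs)).1 =
      out0 ++ M.drop s := by
  induction n with
  | zero =>
      intro s cs out0 M hlen _ hmem _
      have hdrop : M.drop s = [] := by
        rw [List.drop_eq_nil_iff]
        have := hlen M hmem
        omega
      simp [hdrop]
  | succ n ih =>
      intro s cs out0 M hlen htake hmem hub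
      have hm : s < M.length := by rw [hlen M hmem]; omega
      have hgetD : ∀ c ∈ cs, PySem.List.pyGetD c ((s : Nat) : Int) 0 = c.getD s 0 := by
        intro c _; rw [PySem.List.pyGetD_natCast]
      -- the computed column maximum is M's entry at s
      have hbest : (PySem.List.max? (cs.map (fun c => PySem.List.pyGetD c ((s : Nat) : Int) 0))
          (fun x => x)).getD 0 = M.getD s 0 := by
        obtain ⟨m, hmx⟩ : ∃ m, PySem.List.max? (cs.map (fun c => PySem.List.pyGetD c ((s:Nat):Int) 0)) (fun x => x) = some m := by
          rcases h : PySem.List.max? (cs.map (fun c => PySem.List.pyGetD c ((s:Nat):Int) 0)) (fun x => x) with _ | m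
          · have hnil := (PySem.List.max?_eq_none_iff _ _).mp h
            rw [List.map_eq_nil_iff] at hnil
            subst hnil
            exact absurd hmem (List.not_mem_nil)
          · exact ⟨m, rfl⟩
        rw [hmx, Option.getD_some]
        have hmmem := PySem.List.max?_mem hmx
        have hmub := PySem.List.max?_isMax hmx
        obtain ⟨c, hcmem, hcm⟩ := List.mem_map.mp hmmem
        have hcl : s < c.length := by rw [hlen c hcmem]; omega
        apply le_antisymm
        · rw [← hcm, hgetD c hcmem]
          exact getD_le_of_le s c M (htake c hcmem) hcl hm (hub c hcmem)
        · have hin : PySem.List.pyGetD M ((s:Nat):Int) 0 ∈ cs.map (fun c => PySem.List.pyGetD c ((s:Nat):Int) 0) :=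
            List.mem_map.mpr ⟨M, hmem, rfl⟩
          have := hmub _ hin
          rwa [hgetD M hmem] at this
      -- one elimination step
      rw [List.range'_succ, List.map_cons, List.foldl_cons]
      simp only [colStep, hbest]
      set cs' := cs.filter (fun c => PySem.List.pyGetD c ((s:Nat):Int) 0 == M.getD s 0) with hcs'
      have hsub : ∀ c ∈ cs', c ∈ cs := fun c hc => (List.mem_filter.mp hc).1
      have hMin' : M ∈ cs' := by
        rw [hcs', List.mem_filter]
        exact ⟨hmem, by rw [hgetD M hmem]; simp⟩
      have hcol : ∀ c ∈ cs', c.getD s 0 = M.getD s 0 := by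
        intro c hc
        have hf := (List.mem_filter.mp hc).2
        rw [hgetD c (hsub c hc)] at hf
        exact eq_of_beq hf
      have ih' := ih (s + 1) cs' (out0 ++ [M.getD s 0]) M
        (by intro c hc; rw [hlen c (hsub c hc)]; omega)
        (by
          intro c hc
          have hcl : s < c.length := by rw [hlen c (hsub c hc)]; omega
          rw [List.take_add_one, List.take_add_one, htake c (hsub c hc),
            List.getElem?_eq_getElem hcl, List.getElem?_eq_getElem hm,
            ← List.getD_eq_getElem c 0 hcl, ← List.getD_eq_getElem M 0 hm,
            hcol c hc])
        hMin' (fun c hc => hub c (hsub c hc))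
      rw [ih', List.append_assoc, List.singleton_append, List.getD_eq_getElem M 0 hm,
        ← List.drop_eq_getElem_cons hm]

-- every candidate in the pool has length A.length
theorem cand_lengths (A : List Int) (j : Int) (h1 : 1 ≤ j) (hlen : j ≤ (A.length : Int))
    (hne : A ≠ []) :
    ∀ c ∈ (((PySem.List.slice? A none none (-1)).getD []) ::
        ([PySem.List.pyGetD A (-1) 0] ++ PySem.List.slice A none (some (-1))) ::
      (PySem.List.pyRange 0 j 1).map (fun i =>
        PySem.List.slice A (some j) none ++
        ((PySem.List.slice? (PySem.List.slice A (some i) (some j)) none none (-1)).getD []) ++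
        PySem.List.slice A none (some i))), c.length = A.length := by
  intro c hc
  have hA1 : 1 ≤ A.length := List.length_pos_iff.mpr hne
  rcases List.mem_cons.mp hc with h | h
  · rw [h, PySem.List.slice?_none_none_neg_one, Option.getD_some, List.length_reverse]
  · rcases List.mem_cons.mp h with h' | h
    · rw [h', PySem.List.slice_to_neg_one]
      simp only [List.length_append, List.length_cons, List.length_nil, List.length_dropLast]
      omega
    obtain ⟨i, hi, rfl⟩ := List.mem_map.mp h
    obtain ⟨hi0, hij⟩ := (PySem.List.mem_pyRange_one).mp hi
    rw [PySem.List.slice_from A (by omega : (0:Int) ≤ j),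
      PySem.List.slice_toNat A hi0 (by omega : (0:Int) ≤ j),
      PySem.List.slice?_none_none_neg_one, Option.getD_some,
      PySem.List.slice_to A hi0]
    simp only [List.length_append, List.length_reverse, List.length_take, List.length_drop]
    omega

-- A's fold of pairwise max over the candidates equals B's column-wise elimination over the pool
theorem main_bridge (A : List Int) (j : Int) (h1 : 1 ≤ j) (hlen : j ≤ (A.length : Int))
    (hne : A ≠ []) :
    (PySem.List.pyRange 0 j 1).foldl (fun res i =>
        pymax res (PySem.List.slice A (some j) none ++
          ((PySem.List.slice? (PySem.List.slice A (some i) (some j)) none none (-1)).getD []) ++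
          PySem.List.slice A none (some i)))
      (pymax ((PySem.List.slice? A none none (-1)).getD [])
        ([PySem.List.pyGetD A (-1) 0] ++ PySem.List.slice A none (some (-1)))) =
    ((PySem.List.pyRange 0 (A.length : Int) 1).foldl colStep
      (([] : List Int),
        [((PySem.List.slice? A none none (-1)).getD []),
         [PySem.List.pyGetD A (-1) 0] ++ PySem.List.slice A none (some (-1))] ++
        (PySem.List.pyRange 0 j 1).map (fun i =>
          PySem.List.slice A (some j) none ++
          ((PySem.List.slice? (PySem.List.slice A (some i) (some j)) none none (-1)).getD []) ++
          PySem.List.slice A none (some i)))).1 := by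
  set rev := ((PySem.List.slice? A none none (-1)).getD []) with hrev
  set rot := [PySem.List.pyGetD A (-1) 0] ++ PySem.List.slice A none (some (-1)) with hrot
  set candF := fun i => PySem.List.slice A (some j) none ++
      ((PySem.List.slice? (PySem.List.slice A (some i) (some j)) none none (-1)).getD []) ++
      PySem.List.slice A none (some i) with hcandF
  set loopC := (PySem.List.pyRange 0 j 1).map candF with hloopC
  -- A's fold is the fold of pymax over the whole pool
  have hA : (PySem.List.pyRange 0 j 1).foldl (fun res i => pymax res (candF i)) (pymax rev rot) =
      (rot :: loopC).foldl pymax rev := by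
    rw [hloopC, ← List.foldl_map, List.foldl_cons]
  set M := (rot :: loopC).foldl pymax rev with hM
  obtain ⟨hmem, hub⟩ := foldl_pymax_spec (rot :: loopC) rev
  rw [hA]
  -- B's elimination returns the same maximum
  have hpool : ([rev, rot] ++ loopC) = rev :: rot :: loopC := by simp
  have hrange : PySem.List.pyRange 0 (A.length : Int) 1 =
      (List.range' 0 A.length).map (fun (p : Nat) => (p : Int)) := by
    rw [PySem.List.pyRange_one, ← List.range_eq_range']
    simp
  rw [hpool, hrange, prune_eq A.length 0 (rev :: rot :: loopC) [] M
    (by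
      intro c hc
      have := cand_lengths A j h1 hlen hne c hc
      omega)
    (by intro c _; simp) hmem hub]
  simp

-- first-argmax characterisation shared by the two j computations
def IsFirstArgmax (A : List Int) (t j : Int) : Prop :=
  1 ≤ j ∧ j < t ∧
  (∀ u : Int, 1 ≤ u → u < t → PySem.List.pyGetD A u 0 ≤ PySem.List.pyGetD A j 0) ∧
  (∀ u : Int, 1 ≤ u → u < j → PySem.List.pyGetD A u 0 < PySem.List.pyGetD A j 0)

theorem isFirstArgmax_unique {A : List Int} {t j1 j2 : Int}
    (h1 : IsFirstArgmax A t j1) (h2 : IsFirstArgmax A t j2) : j1 = j2 := by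
  obtain ⟨hb1, ht1, hle1, hlt1⟩ := h1
  obtain ⟨hb2, ht2, hle2, hlt2⟩ := h2
  by_contra hne
  rcases lt_or_gt_of_ne hne with h | h
  · exact absurd (hle1 j2 hb2 ht2) (not_le_of_gt (hlt2 j1 hb1 h))
  · exact absurd (hle2 j1 hb1 ht1) (not_le_of_gt (hlt1 j2 hb2 h))

-- A's scan computes the first argmax of A[1:t]
theorem afold_aux (A : List Int) (n : Nat) :
    IsFirstArgmax A (2 + n) ((PySem.List.pyRange 2 (2 + (n : Int)) 1).foldl (fun j i =>
      if PySem.List.pyGetD A i 0 > PySem.List.pyGetD A j 0 then i else j) 1) := by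
  induction n with
  | zero =>
      rw [show ((2:Int) + (0:Nat)) = 2 by norm_num, PySem.List.pyRange_one_eq_nil (le_refl 2)]
      simp only [List.foldl_nil]
      refine ⟨le_refl 1, by norm_num, ?_, ?_⟩
      · intro u h1 h2; have : u = 1 := by omega
        subst this; exact le_refl _
      · intro u h1 h2; omega
  | succ n ih =>
      rw [show ((2:Int) + ((n+1 : Nat) : Int)) = (2 + (n:Int)) + 1 by push_cast; ring,
        PySem.List.pyRange_one_succ_right (by omega), List.foldl_append]
      obtain ⟨hb, ht, hle, hlt⟩ := ih
      set j := (PySem.List.pyRange 2 (2 + (n : Int)) 1).foldl (fun j i =>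
        if PySem.List.pyGetD A i 0 > PySem.List.pyGetD A j 0 then i else j) 1 with hj
      simp only [List.foldl_cons, List.foldl_nil]
      by_cases hc : PySem.List.pyGetD A (2 + (n:Int)) 0 > PySem.List.pyGetD A j 0
      · rw [if_pos hc]
        refine ⟨by omega, by omega, ?_, ?_⟩
        · intro u h1 h2
          by_cases hu : u < 2 + (n:Int)
          · exact le_trans (hle u h1 hu) (le_of_lt hc)
          · have : u = 2 + (n:Int) := by omega
            subst this; exact le_refl _
        · intro u h1 h2
          exact lt_of_le_of_lt (hle u h1 h2) hc
      · rw [if_neg hc]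
        rw [not_lt] at hc
        refine ⟨hb, by omega, ?_, hlt⟩
        · intro u h1 h2
          by_cases hu : u < 2 + (n:Int)
          · exact hle u h1 hu
          · have : u = 2 + (n:Int) := by omega
            subst this; exact hc

-- B's max+index over the window A[1:N] computes the same first argmax
theorem bdef_isFirstArgmax (A : List Int) (N : Int) (h3 : 3 ≤ N) (hlen : N ≤ (A.length : Int)) :
    IsFirstArgmax A N
      (1 + (((PySem.List.index? (PySem.List.slice A (some 1) (some N))
          ((PySem.List.max? (PySem.List.slice A (some 1) (some N)) (fun x => x)).getD 0)).getD 0 : Nat) : Int)) := by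
  rw [PySem.List.slice_toNat A (show (0:Int) ≤ 1 by norm_num) (show (0:Int) ≤ N by omega)]
  simp only [Int.toNat_one]
  set L := (A.drop 1).take (N.toNat - 1) with hL
  have hLlen : L.length = N.toNat - 1 := by
    simp [hL]; omega
  have hLne : L ≠ [] := by
    intro h
    rw [h] at hLlen
    simp at hLlen
    omega
  obtain ⟨m, hm⟩ : ∃ m, PySem.List.max? L (fun x => x) = some m := by
    rcases h : PySem.List.max? L (fun x => x) with _ | m
    · exact absurd ((PySem.List.max?_eq_none_iff L (fun x => x)).mp h) hLne
    · exact ⟨m, rfl⟩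
  have hmax : ∀ y ∈ L, y ≤ m := by
    intro y hy; exact PySem.List.max?_isMax hm y hy
  have hmem : m ∈ L := PySem.List.max?_mem hm
  obtain ⟨k, hk⟩ : ∃ k, PySem.List.index? L m = some k := by
    rcases h : PySem.List.index? L m with _ | k
    · exact absurd hmem ((PySem.List.index?_eq_none_iff L m).mp h)
    · exact ⟨k, rfl⟩
  obtain ⟨hklt, hkm, hkfirst⟩ := PySem.List.getElem_of_index?_eq_some hk
  have hklt' : (k : Int) + 1 < N := by rw [hLlen] at hklt; omega
  simp only [hm, Option.getD_some]
  rw [hk]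
  simp only [Option.getD_some]
  have hgetL : ∀ (i : Nat), (h : i < L.length) → L[i] = A[i+1]'(by rw [hLlen] at h; omega) := by
    intro i h
    simp [hL, List.getElem_take]
  have hAget : ∀ (u : Int) (h1 : 1 ≤ u) (hu : u < N), PySem.List.pyGetD A u 0 = L[u.toNat - 1]'(by rw [hLlen]; omega) := by
    intro u h1 hu
    rw [PySem.List.pyGetD_eq_getElem A 0 (by omega) (by omega)]
    rw [hgetL (u.toNat - 1) (by rw [hLlen]; omega)]
    congr 1
    omega
  refine ⟨by omega, by omega, ?_, ?_⟩
  · intro u h1 hu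
    rw [hAget u h1 hu, hAget (1 + (k:Int)) (by omega) (by omega)]
    have hke : ((1:Int) + (k:Int)).toNat - 1 = k := by omega
    simp only [hke, hkm]
    exact hmax _ (List.getElem_mem _)
  · intro u h1 hu
    rw [hAget u h1 (by omega), hAget (1 + (k:Int)) (by omega) (by omega)]
    have hke : ((1:Int) + (k:Int)).toNat - 1 = k := by omega
    simp only [hke, hkm]
    have hne := hkfirst (u.toNat - 1) (by omega)
    have hle := hmax _ (List.getElem_mem (by omega : u.toNat - 1 < L.length))
    omega

-- ===== VERDICT (by name: the statement is the Claim_ definition above) =====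
set_option maxHeartbeats 2000000 in
theorem solve_spec : Claim_equal_solve := by
  intro N A _hDom hPre
  unfold Spec_solve
  by_cases hone : N = 1
  · simp [solve, solve_alt, hone]
  · have hne : A ≠ [] := by
      rcases hPre with h | ⟨h, _⟩
      · exact absurd h hone
      · exact h
    by_cases hlone : A.length = 1
    · -- B returns A unchanged; A's machinery also returns the singleton
      have hN2 : N ≤ 2 := by
        rcases hPre with h | ⟨-, h | h⟩
        · omega
        · exact h
        · omega
      obtain ⟨a, rfl⟩ := List.length_eq_one_iff.mp hlone
      unfold solve solve_alt
      rw [if_neg (by simpa using hone), if_pos (by simp)]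
      simp only []
      rw [PySem.List.pyRange_one_eq_nil hN2]
      simp [pysem, pymax]
    · have hlen2 : 2 ≤ A.length := by
        rcases A with _ | ⟨a, t⟩
        · exact absurd rfl hne
        · rcases t with _ | ⟨b, t⟩
          · exact absurd rfl hlone
          · simp
      unfold solve solve_alt
      rw [if_neg (by simpa using hone), if_neg (by simp [hone]; omega)]
      simp only []
      by_cases hsmall : N ≤ 2
      · -- the scan never runs: both pivots are 1
        rw [if_pos hsmall, PySem.List.pyRange_one_eq_nil hsmall]
        simp only [List.foldl_nil]
        exact main_bridge A 1 (le_refl 1) (by omega) hne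
      · -- main case: 3 ≤ N ≤ len A, the two pivot computations agree
        have h3 : 3 ≤ N := by omega
        have hlenN : N ≤ (A.length : Int) := by
          rcases hPre with h | ⟨-, h | h⟩
          · omega
          · omega
          · exact h
        rw [if_neg hsmall]
        have hAfa : IsFirstArgmax A N ((PySem.List.pyRange 2 N 1).foldl (fun j i =>
            if PySem.List.pyGetD A i 0 > PySem.List.pyGetD A j 0 then i else j) 1) := by
          have h := afold_aux A (N - 2).toNat
          rw [show (2 + ((N-2).toNat : Int)) = N from by omega] at h
          exact h
        have hBfa := bdef_isFirstArgmax A N h3 hlenN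
        have hjj := isFirstArgmax_unique hAfa hBfa
        rw [hjj]
        obtain ⟨hjb1, hjbN, -, -⟩ := hBfa
        exact main_bridge A _ hjb1 (by omega) hne
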